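-- pv_equiv track=rewrite | github.com/jbranchaud/jager | FaultLocalization.py | count_traces
-- ===== SOURCE A (Python) =====
-- def count_traces(traces):
--     """
--     count_traces
--
--     given a dictionary of traces, this function will go through the
--     dictionary to count the number of good and bad traces. A tuple of the
--     form (goodcount,badcount) will be returned.
--     """
--     good = 0
--     bad = 0
--     for trace in traces:
--         status = trace['status']
--         if status == 'good':
--             good += 1
--         elif status == 'bad':
--             bad += 1
--
--     return (good,bad)
-- ===== SOURCE B (Python) =====
-- def count_traces(traces):
--     """Extract statuses once, then two counting passes with list.count."""
--     statuses = [t['status'] for t in traces]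
--     return (statuses.count('good'), statuses.count('bad'))
-- ===== Notes on version B (the rewrite author's own statement) =====
-- stated objective: idiomatic
-- what changed: Replaces the single pass with two conditional accumulators by a staged decomposition: extract the status list once, then two separate list.count passes; the per-element if/elif control flow disappears.
import Mathlib
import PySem

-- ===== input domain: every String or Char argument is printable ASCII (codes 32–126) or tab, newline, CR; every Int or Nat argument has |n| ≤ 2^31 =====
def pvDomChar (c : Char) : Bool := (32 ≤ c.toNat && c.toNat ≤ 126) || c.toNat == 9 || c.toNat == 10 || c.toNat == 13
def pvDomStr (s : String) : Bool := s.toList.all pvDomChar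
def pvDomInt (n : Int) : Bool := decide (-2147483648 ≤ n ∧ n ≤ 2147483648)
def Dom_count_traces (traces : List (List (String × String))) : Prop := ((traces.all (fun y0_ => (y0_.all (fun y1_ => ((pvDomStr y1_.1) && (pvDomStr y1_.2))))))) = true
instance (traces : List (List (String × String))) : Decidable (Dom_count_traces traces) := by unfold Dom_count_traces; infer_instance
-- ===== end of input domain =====

-- B replaces A's single pass with two conditional accumulators by a staged decomposition: extract statuses once, then two list.count passes.


-- ===== PORT A =====
def count_traces (traces : List (List (String × String))) : Int × Int :=
  let r := traces.foldl (fun (gb : Int × Int) trace =>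
    let status := (PySem.Dict.mk trace).getD "status" ""   -- trace['status']; Pre_ guarantees the key is present
    if status = "good" then (gb.1 + 1, gb.2)
    else if status = "bad" then (gb.1, gb.2 + 1)
    else gb) (0, 0)
  (r.1, r.2)

-- ===== PORT B =====
def count_traces_alt (traces : List (List (String × String))) : Int × Int :=
  let statuses := traces.map (fun t => (PySem.Dict.mk t).getD "status" "")  -- t['status']; Pre_ guarantees the key is present
  ((PySem.List.count statuses "good" : Int), (PySem.List.count statuses "bad" : Int))

-- ===== PRECONDITION & SPEC =====
-- Pre_ excludes exactly the inputs where trace['status'] raises KeyError in both Pythons.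
def Pre_count_traces (traces : List (List (String × String))) : Prop :=
  ∀ t ∈ traces, (PySem.Dict.mk t).contains "status" = true
instance (traces : List (List (String × String))) : Decidable (Pre_count_traces traces) := by unfold Pre_count_traces; infer_instance
def pvWitness_count_traces : (List (List (String × String))) := [[("status", "good")], [("status", "odd")]]
def Spec_count_traces (traces : List (List (String × String))) (out : Int × Int) : Prop := out = count_traces_alt traces
instance (traces : List (List (String × String))) (out : Int × Int) : Decidable (Spec_count_traces traces out) := by unfold Spec_count_traces; infer_instance

-- ===== CLAIM (what is proved, stated in full; the proofs are below) =====
def Claim_equal_count_traces : Prop := ∀ (traces : List (List (String × String))), Dom_count_traces traces → Pre_count_traces traces → Spec_count_traces traces (count_traces traces)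

-- ===== LEMMAS AND PROOFS =====
def pvStatus (t : List (String × String)) : String := (PySem.Dict.mk t).getD "status" ""

lemma countA_eq (traces : List (List (String × String))) : ∀ (g b : Int),
    traces.foldl (fun (gb : Int × Int) trace =>
      let status := (PySem.Dict.mk trace).getD "status" ""
      if status = "good" then (gb.1 + 1, gb.2)
      else if status = "bad" then (gb.1, gb.2 + 1)
      else gb) (g, b)
    = (g + ((traces.map pvStatus).count "good" : Int), b + ((traces.map pvStatus).count "bad" : Int)) := by
  induction traces with
  | nil => simp
  | cons t rest ih =>
    intro g b
    simp only [List.foldl_cons, List.map_cons, List.count_cons]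
    by_cases hg : pvStatus t = "good"
    · simp [pvStatus] at hg
      simp [hg, pvStatus, ih]
      omega
    · by_cases hb : pvStatus t = "bad"
      · simp [pvStatus] at hb hg
        simp [hb, pvStatus, ih]
        omega
      · simp [pvStatus] at hb hg
        simp [hb, hg, pvStatus, ih]

-- ===== VERDICT (by name: the statement is the Claim_ definition above) =====
theorem count_traces_spec : Claim_equal_count_traces := by
  intro traces _ _
  unfold Spec_count_traces count_traces count_traces_alt
  simp only [countA_eq, PySem.List.count_eq, Prod.mk.injEq, zero_add]
  exact ⟨rfl, rfl⟩
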